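-- pv_equiv track=rewrite | github.com/gbcolborne/ner_eval | eval/hardeval.py | get_bio2_mention_offsets
-- ===== SOURCE A (Python) =====
-- def get_bio2_mention_offsets(labels):
--     """Given a list of BIO-2 labels, find mention boundaries, yield a
--     (start offset, end offset) tuple for each mention.
--
--     """
--     prefixes = [x[0] for x in labels]
--     # Pad labels with an extra O at the end to avoid going out of
--     # bounds when we look for the end offset of the mentons we find
--     prefixes.append("O")
--     i = 0
--     while i < len(labels):
--         prefix = prefixes[i]
--         if prefix == "B":
--             end = i
--             while prefixes[end+1][0] == "I":
--                 end += 1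
--             yield (i, end)
--             i = end + 1
--         else:
--             i += 1
-- ===== SOURCE B (Python) =====
-- def get_bio2_mention_offsets(labels):
--     """Single flat pass maintaining an open_start state (no nested while)."""
--     open_start = None
--     for i, lab in enumerate(labels):
--         c = lab[0]
--         if c == "B":
--             if open_start is not None:
--                 yield (open_start, i - 1)
--             open_start = i
--         elif c == "I":
--             pass
--         else:
--             if open_start is not None:
--                 yield (open_start, i - 1)
--             open_start = None
--     if open_start is not None:
--         yield (open_start, len(labels) - 1)
-- ===== Notes on version B (the rewrite author's own statement) =====
-- stated objective: simpler
-- what changed: Replaced A's nested while/jump scan (inner loop over the padded prefix list to find each mention end, then jumping i past it) by a single flat pass carrying an open_start state flushed on 'B', non-'I', and end of input; no padded list is built.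
import Mathlib
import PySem

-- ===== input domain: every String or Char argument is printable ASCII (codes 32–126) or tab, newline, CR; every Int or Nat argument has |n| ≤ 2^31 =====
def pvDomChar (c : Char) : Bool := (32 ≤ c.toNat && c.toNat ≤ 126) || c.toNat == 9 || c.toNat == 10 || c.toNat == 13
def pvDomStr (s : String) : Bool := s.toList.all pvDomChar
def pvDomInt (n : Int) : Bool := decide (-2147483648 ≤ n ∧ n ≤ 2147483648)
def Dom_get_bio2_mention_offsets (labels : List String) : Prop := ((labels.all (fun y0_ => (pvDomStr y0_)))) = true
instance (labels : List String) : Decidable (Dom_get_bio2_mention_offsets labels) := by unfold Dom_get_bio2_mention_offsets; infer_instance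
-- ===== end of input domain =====

-- B replaces A's nested while/jump scan by one flat pass with an open_start state (simpler decomposition, same O(n) cost).
-- Pre_ excludes lists containing the empty string, on which both Pythons raise IndexError at label[0].


-- ===== PORT A =====
-- inner `while prefixes[end+1][0] == "I": end += 1` (the range guard only makes the
-- recursion total; under the padding it is always in range where Python reads)
def pvFindEnd (prefixes : List (Option Char)) (e : Nat) : Nat :=
  if h : e + 1 < prefixes.length then
    if prefixes[e+1] = some 'I' then pvFindEnd prefixes (e+1) else e
  else e
termination_by prefixes.length - (e+1)

theorem pvFindEnd_ge (prefixes : List (Option Char)) (e : Nat) : e ≤ pvFindEnd prefixes e := by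
  unfold pvFindEnd
  split
  · split
    · exact le_trans (Nat.le_succ e) (pvFindEnd_ge prefixes (e+1))
    · exact le_refl e
  · exact le_refl e
termination_by prefixes.length - (e+1)

-- outer `while i < len(labels)` loop
def pvLoopA (prefixes : List (Option Char)) (n i : Nat) : List (Int × Int) :=
  if _h : i < n then
    if prefixes[i]? = some (some 'B') then
      let e := pvFindEnd prefixes i
      ((i : Int), (e : Int)) :: pvLoopA prefixes n (e+1)
    else pvLoopA prefixes n (i+1)
  else []
termination_by n - i
decreasing_by
  · have := pvFindEnd_ge prefixes i; omega
  · omega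

def get_bio2_mention_offsets (labels : List String) : List (Int × Int) :=
  -- prefixes = [x[0] for x in labels] + ["O"]; x[0] as head? (none = IndexError, excluded by Pre_)
  pvLoopA ((labels.map (fun s => s.toList.head?)) ++ [some 'O']) labels.length 0

-- ===== PORT B =====
-- flat pass over the first characters with carried state open_start (some s / none)
def pvLoopB (cs : List (Option Char)) (i : Int) (st : Option Int) : List (Int × Int) :=
  match cs with
  | [] =>
    match st with
    | some s => [(s, i - 1)]
    | none => []
  | c :: rest =>
    if c = some 'B' then
      match st with
      | some s => (s, i - 1) :: pvLoopB rest (i+1) (some i)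
      | none => pvLoopB rest (i+1) (some i)
    else if c = some 'I' then pvLoopB rest (i+1) st
    else
      match st with
      | some s => (s, i - 1) :: pvLoopB rest (i+1) none
      | none => pvLoopB rest (i+1) none

def get_bio2_mention_offsets_alt (labels : List String) : List (Int × Int) :=
  pvLoopB (labels.map (fun s => s.toList.head?)) 0 none

-- ===== PRECONDITION & SPEC =====
-- Pre_ excludes lists containing the empty string: there both Pythons raise IndexError at label[0].
def Pre_get_bio2_mention_offsets (labels : List String) : Prop := ∀ s ∈ labels, s ≠ ""
instance (labels : List String) : Decidable (Pre_get_bio2_mention_offsets labels) := by unfold Pre_get_bio2_mention_offsets; infer_instance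

def pvWitness_get_bio2_mention_offsets : List String := ["B", "I", "O", "B", "B", "I"]

def Spec_get_bio2_mention_offsets (labels : List String) (out : List (Int × Int)) : Prop := out = get_bio2_mention_offsets_alt labels
instance (labels : List String) (out : List (Int × Int)) : Decidable (Spec_get_bio2_mention_offsets labels out) := by unfold Spec_get_bio2_mention_offsets; infer_instance

-- ===== CLAIM (what is proved, stated in full; the proofs are below) =====
def Claim_equal_get_bio2_mention_offsets : Prop := ∀ (labels : List String), Dom_get_bio2_mention_offsets labels → Pre_get_bio2_mention_offsets labels → Spec_get_bio2_mention_offsets labels (get_bio2_mention_offsets labels)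

-- ===== LEMMAS AND PROOFS =====

theorem pvGetP (ps : List (Option Char)) (k : Nat) (hk : k < ps.length) :
    (ps ++ [some 'O'])[k]? = some ps[k] := by
  rw [List.getElem?_append_left (by omega)]; simp [hk]

theorem pvFindEnd_at (ps : List (Option Char)) (j : Nat) (h1 : 1 ≤ j) (h2 : j ≤ ps.length) :
    pvFindEnd (ps ++ [some 'O']) (j-1) =
      if hj : j < ps.length then
        (if ps[j] = some 'I' then pvFindEnd (ps ++ [some 'O']) j else j - 1)
      else j - 1 := by
  have hj1 : j - 1 + 1 = j := by omega
  rw [pvFindEnd]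
  simp only [hj1]
  by_cases hj : j < ps.length
  · have hlt : j < (ps ++ [some 'O']).length := by simp; omega
    rw [dif_pos hlt]
    rw [List.getElem_append_left hj]
    simp [hj]
  · have hje : j = ps.length := by omega
    subst hje
    have hlt : ps.length < (ps ++ [some 'O']).length := by simp
    rw [dif_pos hlt]
    simp

theorem pv_main2 (ps : List (Option Char)) (m : Nat) :
    (∀ i, i ≤ ps.length → ps.length - i = m →
      pvLoopA (ps ++ [some 'O']) ps.length i = pvLoopB (ps.drop i) (i : Int) none)
    ∧ (∀ j, 1 ≤ j → j ≤ ps.length → ps.length - j = m → ∀ s : Int,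
      pvLoopB (ps.drop j) (j : Int) (some s)
        = (s, ((pvFindEnd (ps ++ [some 'O']) (j-1) : Nat) : Int))
            :: pvLoopA (ps ++ [some 'O']) ps.length (pvFindEnd (ps ++ [some 'O']) (j-1) + 1)) := by
  induction m with
  | zero =>
    constructor
    · intro i hi hm
      have hie : i = ps.length := by omega
      subst hie
      simp [List.drop_length, pvLoopA, pvLoopB]
    · intro j h1 h2 hm s
      have hje : j = ps.length := by omega
      subst hje
      have hfe : pvFindEnd (ps ++ [some 'O']) (ps.length - 1) = ps.length - 1 := by
        rw [pvFindEnd_at ps ps.length h1 (le_refl _)]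
        simp
      rw [hfe, List.drop_length]
      have hsp : ps.length - 1 + 1 = ps.length := by omega
      rw [hsp]
      rw [pvLoopB, pvLoopA]
      simp
      push_cast [Nat.cast_sub h1]
      ring_nf
  | succ m ih =>
    constructor
    · intro i hi hm
      have hlt : i < ps.length := by omega
      rw [List.drop_eq_getElem_cons hlt]
      rw [pvLoopA, pvLoopB]
      rw [dif_pos hlt, pvGetP ps i hlt]
      by_cases hB : ps[i] = some 'B'
      · rw [if_pos (by rw [hB]), if_pos (by rw [hB])]
        have h2 := ih.2 (i+1) (by omega) (by omega) (by omega) (i : Int)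
        have hc : ((i+1 : Nat) : Int) = (i : Int) + 1 := by push_cast; ring
        rw [hc] at h2
        simp only [Nat.add_sub_cancel] at h2
        rw [h2]
      · rw [if_neg (by simp [hB]), if_neg (by simpa using hB)]
        have h1 := ih.1 (i+1) (by omega) (by omega)
        have hc : ((i+1 : Nat) : Int) = (i : Int) + 1 := by push_cast; ring
        rw [hc] at h1
        by_cases hI : ps[i] = some 'I'
        · rw [if_pos (by rw [hI]), ← h1]
        · rw [if_neg (by simpa using hI), ← h1]
    · intro j h1 h2 hm s
      have hlt : j < ps.length := by omega
      rw [List.drop_eq_getElem_cons hlt]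
      rw [pvLoopB]
      rw [pvFindEnd_at ps j h1 h2, dif_pos hlt]
      have hc : ((j+1 : Nat) : Int) = (j : Int) + 1 := by push_cast; ring
      by_cases hB : ps[j] = some 'B'
      · rw [if_pos (by rw [hB]), if_neg (by rw [hB]; decide)]
        have h2' := ih.2 (j+1) (by omega) (by omega) (by omega) (j : Int)
        rw [hc] at h2'
        simp only [Nat.add_sub_cancel] at h2'
        rw [h2']
        have hsp : j - 1 + 1 = j := by omega
        rw [hsp]
        -- RHS: loopA at j is a 'B' step
        conv_rhs => rw [pvLoopA]
        rw [dif_pos hlt, pvGetP ps j hlt, if_pos (by rw [hB])]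
        push_cast [Nat.cast_sub h1]
        ring_nf
      · rw [if_neg (by simpa using hB)]
        have hsp : j - 1 + 1 = j := by omega
        by_cases hI : ps[j] = some 'I'
        · rw [if_pos (by rw [hI]), if_pos (by rw [hI])]
          have h2' := ih.2 (j+1) (by omega) (by omega) (by omega) s
          rw [hc] at h2'
          simp only [Nat.add_sub_cancel] at h2'
          rw [h2']
        · rw [if_neg (by simpa using hI), if_neg (by simpa using hI)]
          have h1' := ih.1 (j+1) (by omega) (by omega)
          rw [hc] at h1'
          rw [← h1']
          -- RHS tail: loopA at j skips (not 'B')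
          rw [hsp]
          conv_rhs => rw [pvLoopA]
          rw [dif_pos hlt, pvGetP ps j hlt, if_neg (by simpa using hB)]
          push_cast [Nat.cast_sub h1]
          ring_nf

theorem get_bio2_mention_offsets_spec : Claim_equal_get_bio2_mention_offsets := by
  intro labels _ _
  unfold Spec_get_bio2_mention_offsets get_bio2_mention_offsets get_bio2_mention_offsets_alt
  have h := (pv_main2 (labels.map (fun s => s.toList.head?)) (labels.map (fun s => s.toList.head?)).length).1 0 (Nat.zero_le _) (by omega)
  simpa using h
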